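-- pv_equiv track=rewrite | github.com/chenyuhang55555/Python | Test/millennium.py | countBalancingElements
-- ===== SOURCE A (Python) =====
-- def countBalancingElements(arr):
--     odd_all_sum = sum([arr[i] for i in range(0, len(arr), 2)])
--     even_all_sum = sum([arr[i] for i in range(1, len(arr), 2)])
--
--     even_left = 0
--     odd_left = 0
--     count = 0
--     for i in range(len(arr)):
--         if (i+1)%2 == 1: # itself is in odd position
--             even_left += arr[i-1] if (i - 1 >= 0) else 0
--             odd_right = odd_all_sum - odd_left - arr[i]
--             even_right = even_all_sum - even_left
--         elif (i+1)%2 == 0: # itself is in even position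
--             odd_left += arr[i - 1] if (i - 1 >= 0) else 0
--             odd_right = odd_all_sum - odd_left
--             even_right = even_all_sum - even_left - arr[i]
--         if (even_left + odd_right) == (odd_left + even_right):
--             count += 1
--     return count
-- ===== SOURCE B (Python) =====
-- def countBalancingElements(arr):
--     # Transform to an alternating-sign sequence: removing index i balances the
--     # remaining even/odd position sums iff 2*(alternating prefix) + signed element
--     # equals the alternating total.
--     signed = [x if i % 2 == 0 else -x for i, x in enumerate(arr)]
--     total = sum(signed)
--     count = 0
--     run = 0
--     for s in signed:
--         if 2 * run + s == total:
--             count += 1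
--         run += s
--     return count
-- ===== Notes on version B (the rewrite author's own statement) =====
-- stated objective: alternative
-- what changed: Replaces A's fused scan that maintains two even/odd-position running sums and re-derives four left/right quantities per index with an alternating-sign transform: map arr to signed[i] = (-1)^i*arr[i], take its total, then count indices where 2*(running alternating prefix) + signed element equals the total.
import Mathlib
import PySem

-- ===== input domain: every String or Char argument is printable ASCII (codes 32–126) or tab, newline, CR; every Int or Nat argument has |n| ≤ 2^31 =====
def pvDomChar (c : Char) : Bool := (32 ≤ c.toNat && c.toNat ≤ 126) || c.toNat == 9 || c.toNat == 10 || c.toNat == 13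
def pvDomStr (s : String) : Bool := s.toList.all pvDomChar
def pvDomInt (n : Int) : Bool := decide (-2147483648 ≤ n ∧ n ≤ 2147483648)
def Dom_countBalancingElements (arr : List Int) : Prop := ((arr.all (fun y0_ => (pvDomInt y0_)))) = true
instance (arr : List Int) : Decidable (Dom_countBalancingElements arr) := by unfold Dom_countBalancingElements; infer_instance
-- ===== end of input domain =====

-- B replaces A's fused scan over two even/odd running sums by an alternating-sign transform:
-- one signed sequence, one running sum, and the criterion 2*run + s == total; alternative, same O(n).


-- ===== PORT A =====
def countBalancingElements (arr : List Int) : Int :=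
  let odd_all_sum := ((PySem.List.pyRange 0 (arr.length : Int) 2).map (fun i => PySem.List.pyGetD arr i 0)).sum
  let even_all_sum := ((PySem.List.pyRange 1 (arr.length : Int) 2).map (fun i => PySem.List.pyGetD arr i 0)).sum
  let st := (PySem.List.pyRange 0 (arr.length : Int) 1).foldl
    (fun (st : Int × Int × Int) i =>
      if PySem.Int.mod (i + 1) 2 == 1 then
        -- itself is in odd position
        let el := st.1 + (if 0 ≤ i - 1 then PySem.List.pyGetD arr (i - 1) 0 else 0)
        let odd_right := odd_all_sum - st.2.1 - PySem.List.pyGetD arr i 0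
        let even_right := even_all_sum - el
        (el, st.2.1, if el + odd_right == st.2.1 + even_right then st.2.2 + 1 else st.2.2)
      else
        -- itself is in even position
        let ol := st.2.1 + (if 0 ≤ i - 1 then PySem.List.pyGetD arr (i - 1) 0 else 0)
        let odd_right := odd_all_sum - ol
        let even_right := even_all_sum - st.1 - PySem.List.pyGetD arr i 0
        (st.1, ol, if st.1 + odd_right == ol + even_right then st.2.2 + 1 else st.2.2))
    (0, 0, 0)
  st.2.2

-- ===== PORT B =====
def countBalancingElements_alt (arr : List Int) : Int :=
  -- alternating-sign transform of the array
  let signed := (PySem.List.enumerate arr 0).map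
    (fun p => if PySem.Int.mod p.1 2 == 0 then p.2 else -p.2)
  let total := signed.sum
  -- single scan: count where 2*run + s == total
  let st := signed.foldl
    (fun (st : Int × Int) s =>
      (if 2 * st.2 + s == total then st.1 + 1 else st.1, st.2 + s))
    ((0 : Int), (0 : Int))
  st.1

-- ===== PRECONDITION & SPEC =====
def Spec_countBalancingElements (arr : List Int) (out : Int) : Prop := out = countBalancingElements_alt arr
instance (arr : List Int) (out : Int) : Decidable (Spec_countBalancingElements arr out) := by unfold Spec_countBalancingElements; infer_instance

-- ===== CLAIM (what is proved, stated in full; the proofs are below) =====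
def Claim_equal_countBalancingElements : Prop := ∀ (arr : List Int), Dom_countBalancingElements arr → Spec_countBalancingElements arr (countBalancingElements arr)

-- ===== LEMMAS AND PROOFS =====

-- pvEP arr k = Σ arr[j] for j < k, j even; pvOP: j odd
def pvEP (arr : List Int) (k : Nat) : Int :=
  ((List.range k).map (fun j => if j % 2 = 0 then arr.getD j 0 else 0)).sum
def pvOP (arr : List Int) (k : Nat) : Int :=
  ((List.range k).map (fun j => if j % 2 = 1 then arr.getD j 0 else 0)).sum

-- A's per-index test (state expressed through the prefix sums), with the whole-array sums as parameters
def pvCond (arr : List Int) (E O : Int) (i : Nat) : Bool :=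
  if i % 2 = 0 then
    pvOP arr i + (E - pvEP arr i - arr.getD i 0) == pvEP arr i + (O - pvOP arr i)
  else
    pvOP arr i + (E - pvEP arr i) == pvEP arr i + (O - pvOP arr i - arr.getD i 0)

-- B's signed element and alternating prefix sum
def pvS (arr : List Int) (k : Nat) : Int :=
  if k % 2 = 0 then arr.getD k 0 else -(arr.getD k 0)
def pvP (arr : List Int) (k : Nat) : Int :=
  ((List.range k).map (pvS arr)).sum

-- B's per-index test
def pvCondB (arr : List Int) (k : Nat) : Bool :=
  2 * pvP arr k + pvS arr k == pvP arr arr.length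

-- the loop body of A, with the two comprehension sums abstracted as E and O
def pvStepA (arr : List Int) (E O : Int) (st : Int × Int × Int) (i : Int) : Int × Int × Int :=
  if PySem.Int.mod (i + 1) 2 == 1 then
    let el := st.1 + (if 0 ≤ i - 1 then PySem.List.pyGetD arr (i - 1) 0 else 0)
    let odd_right := E - st.2.1 - PySem.List.pyGetD arr i 0
    let even_right := O - el
    (el, st.2.1, if el + odd_right == st.2.1 + even_right then st.2.2 + 1 else st.2.2)
  else
    let ol := st.2.1 + (if 0 ≤ i - 1 then PySem.List.pyGetD arr (i - 1) 0 else 0)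
    let odd_right := E - ol
    let even_right := O - st.1 - PySem.List.pyGetD arr i 0
    (st.1, ol, if st.1 + odd_right == ol + even_right then st.2.2 + 1 else st.2.2)

-- the loop body of B's scan, with the total abstracted as T
def pvStepB (T : Int) (st : Int × Int) (s : Int) : Int × Int :=
  (if 2 * st.2 + s == T then st.1 + 1 else st.1, st.2 + s)

lemma pvEP_succ (arr : List Int) (k : Nat) :
    pvEP arr (k + 1) = pvEP arr k + (if k % 2 = 0 then arr.getD k 0 else 0) := by
  simp [pvEP, List.range_succ]
lemma pvOP_succ (arr : List Int) (k : Nat) :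
    pvOP arr (k + 1) = pvOP arr k + (if k % 2 = 1 then arr.getD k 0 else 0) := by
  simp [pvOP, List.range_succ]
lemma pvP_succ (arr : List Int) (k : Nat) :
    pvP arr (k + 1) = pvP arr k + pvS arr k := by
  simp [pvP, List.range_succ]

-- range-by-twos forms of the prefix sums (shape of A's two comprehensions)
lemma pvEP_range2 (arr : List Int) (n : Nat) :
    pvEP arr n = ((List.range ((n + 1) / 2)).map (fun k => arr.getD (2 * k) 0)).sum := by
  induction n with
  | zero => simp [pvEP]
  | succ n ih =>
    rcases Nat.mod_two_eq_zero_or_one n with hm | hm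
    · have ha : (n + 1 + 1) / 2 = (n + 1) / 2 + 1 := by omega
      have hb : 2 * ((n + 1) / 2) = n := by omega
      rw [pvEP_succ, if_pos hm, ih, ha, List.range_succ]
      simp [hb]
    · have ha : (n + 1 + 1) / 2 = (n + 1) / 2 := by omega
      rw [pvEP_succ, if_neg (by omega), ih, ha]
      ring
lemma pvOP_range2 (arr : List Int) (n : Nat) :
    pvOP arr n = ((List.range (n / 2)).map (fun k => arr.getD (2 * k + 1) 0)).sum := by
  induction n with
  | zero => simp [pvOP]
  | succ n ih =>
    rcases Nat.mod_two_eq_zero_or_one n with hm | hm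
    · have ha : (n + 1) / 2 = n / 2 := by omega
      rw [pvOP_succ, if_neg (by omega), ih, ha]
      ring
    · have ha : (n + 1) / 2 = n / 2 + 1 := by omega
      have hb : 2 * (n / 2) + 1 = n := by omega
      rw [pvOP_succ, if_pos hm, ih, ha, List.range_succ]
      simp [hb]

-- A's two comprehension sums are the whole-array parity prefix sums
lemma pv_sum_even (arr : List Int) (n : Nat) :
    ((PySem.List.pyRange 0 (n : Int) 2).map (fun i => PySem.List.pyGetD arr i 0)).sum
      = pvEP arr n := by
  rw [PySem.List.pyRange_of_pos 0 (n : Int) (by norm_num)]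
  by_cases hn : (0 : Int) < (n : Nat)
  · rw [if_pos hn]
    have ht : (((n : Int) - 0 + 2 - 1) / 2).toNat = (n + 1) / 2 := by omega
    rw [ht, pvEP_range2, List.map_map]
    congr 1
    apply List.map_congr_left
    intro k _
    have hcast : (0 : Int) + 2 * (k : Int) = ((2 * k : Nat) : Int) := by push_cast; ring
    simp only [Function.comp_apply]
    rw [hcast, PySem.List.pyGetD_natCast]
  · rw [if_neg hn]
    have : n = 0 := by omega
    subst this
    simp [pvEP]
lemma pv_sum_odd (arr : List Int) (n : Nat) :
    ((PySem.List.pyRange 1 (n : Int) 2).map (fun i => PySem.List.pyGetD arr i 0)).sum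
      = pvOP arr n := by
  rw [PySem.List.pyRange_of_pos 1 (n : Int) (by norm_num)]
  by_cases hn : (1 : Int) < (n : Nat)
  · rw [if_pos hn]
    have ht : (((n : Int) - 1 + 2 - 1) / 2).toNat = n / 2 := by omega
    rw [ht, pvOP_range2, List.map_map]
    congr 1
    apply List.map_congr_left
    intro k _
    have hcast : (1 : Int) + 2 * (k : Int) = ((2 * k + 1 : Nat) : Int) := by push_cast; ring
    simp only [Function.comp_apply]
    rw [hcast, PySem.List.pyGetD_natCast]
  · rw [if_neg hn]
    have hn1 : n = 0 ∨ n = 1 := by omega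
    rcases hn1 with h | h <;> subst h <;> simp [pvOP]

-- one step of A's loop, on the invariant state
lemma pvStepA_spec (arr : List Int) (E O : Int) (n : Nat) (c : Int) :
    pvStepA arr E O (pvOP arr (n - 1), pvEP arr (n - 1), c) (n : Int)
      = (pvOP arr n, pvEP arr n, if pvCond arr E O n then c + 1 else c) := by
  have hmod : PySem.Int.mod ((n : Int) + 1) 2 = (((n + 1) % 2 : Nat) : Int) := by
    exact_mod_cast PySem.Int.mod_natCast (n + 1) 2
  rcases n with _ | m
  · simp only [pvStepA, pvCond]
    norm_num [hmod, PySem.List.pyGetD_zero, pvEP, pvOP]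
  · have h2 : ((m + 1 : Nat) : Int) - 1 = (m : Int) := by push_cast; ring
    rcases Nat.mod_two_eq_zero_or_one m with hm | hm
    · -- m even → index m+1 sits at an even python position: else branch
      have hb : (PySem.Int.mod (((m + 1 : Nat) : Int) + 1) 2 == 1) = false := by
        rw [hmod]; simp; omega
      have e_ep : pvEP arr (m + 1) = pvEP arr m + arr.getD m 0 := by
        rw [pvEP_succ, if_pos hm]
      have e_op : pvOP arr (m + 1) = pvOP arr m := by
        rw [pvOP_succ, if_neg (by omega)]; ring
      have hcond : pvCond arr E O (m + 1)
          = (pvOP arr (m + 1) + (E - pvEP arr (m + 1))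
              == pvEP arr (m + 1) + (O - pvOP arr (m + 1) - arr.getD (m + 1) 0)) := by
        rw [pvCond, if_neg (by omega)]
      simp only [pvStepA, hb, Bool.false_eq_true, if_false, h2, if_pos (Int.natCast_nonneg m),
        PySem.List.pyGetD_natCast, Nat.add_sub_cancel, hcond, e_ep, e_op]
    · -- m odd → index m+1 sits at an odd python position: then branch
      have hb : (PySem.Int.mod (((m + 1 : Nat) : Int) + 1) 2 == 1) = true := by
        rw [hmod]; simp; omega
      have e_ep : pvEP arr (m + 1) = pvEP arr m := by
        rw [pvEP_succ, if_neg (by omega)]; ring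
      have e_op : pvOP arr (m + 1) = pvOP arr m + arr.getD m 0 := by
        rw [pvOP_succ, if_pos hm]
      have hcond : pvCond arr E O (m + 1)
          = (pvOP arr (m + 1) + (E - pvEP arr (m + 1) - arr.getD (m + 1) 0)
              == pvEP arr (m + 1) + (O - pvOP arr (m + 1))) := by
        rw [pvCond, if_pos (by omega)]
      simp only [pvStepA, hb, if_true, h2, if_pos (Int.natCast_nonneg m),
        PySem.List.pyGetD_natCast, Nat.add_sub_cancel, hcond, e_ep, e_op]

-- A's loop invariant
lemma pvA_fold (arr : List Int) (E O : Int) (k : Nat) :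
    (PySem.List.pyRange 0 (k : Int) 1).foldl (pvStepA arr E O) (0, 0, 0)
      = (pvOP arr (k - 1), pvEP arr (k - 1), ((List.range k).countP (pvCond arr E O) : Int)) := by
  induction k with
  | zero => simp [PySem.List.pyRange_one_eq_nil, pvOP, pvEP]
  | succ k ih =>
    have hc : ((k + 1 : Nat) : Int) = (k : Int) + 1 := by push_cast; ring
    rw [hc, PySem.List.pyRange_one_succ_right (by positivity), List.foldl_append]
    simp only [List.foldl_cons, List.foldl_nil, ih, pvStepA_spec, Nat.add_sub_cancel,
      List.range_succ, List.countP_append, List.countP_cons, List.countP_nil]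
    push_cast
    split <;> simp_all

lemma pvA_eq (arr : List Int) :
    countBalancingElements arr
      = ((List.range arr.length).countP
          (pvCond arr (pvEP arr arr.length) (pvOP arr arr.length)) : Int) := by
  have h0 : countBalancingElements arr
      = ((PySem.List.pyRange 0 (arr.length : Int) 1).foldl
          (pvStepA arr
            (((PySem.List.pyRange 0 (arr.length : Int) 2).map (fun i => PySem.List.pyGetD arr i 0)).sum)
            (((PySem.List.pyRange 1 (arr.length : Int) 2).map (fun i => PySem.List.pyGetD arr i 0)).sum))
          (0, 0, 0)).2.2 := rfl
  rw [h0, pv_sum_even, pv_sum_odd, pvA_fold]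

-- B's signed list is the range-indexed image of pvS
lemma pvB_signed (arr : List Int) :
    (PySem.List.enumerate arr 0).map
        (fun p => if PySem.Int.mod p.1 2 == 0 then p.2 else -p.2)
      = (List.range arr.length).map (pvS arr) := by
  rw [PySem.List.enumerate_eq_map_pyRange arr 0, PySem.List.len_eq,
    PySem.List.pyRange_zero_nat, List.map_map, List.map_map]
  apply List.map_congr_left
  intro k _
  have hmod : PySem.Int.mod ((k : Nat) : Int) 2 = ((k % 2 : Nat) : Int) :=
    PySem.Int.mod_natCast k 2
  rcases Nat.mod_two_eq_zero_or_one k with h | h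
  · have hb : (PySem.Int.mod ((k : Nat) : Int) 2 == 0) = true := by rw [hmod, h]; rfl
    simp [Function.comp, pvS, hb, h, PySem.List.pyGetD_natCast]
    intro hc; exfalso; omega
  · have hb : (PySem.Int.mod ((k : Nat) : Int) 2 == 0) = false := by rw [hmod, h]; rfl
    simp [Function.comp, pvS, hb, h, PySem.List.pyGetD_natCast]
    intro hc; exfalso; omega

-- B's scan invariant
lemma pvB_fold (arr : List Int) (T : Int) (k : Nat) :
    ((List.range k).map (pvS arr)).foldl (pvStepB T) ((0 : Int), (0 : Int))
      = (((List.range k).countP (fun j => 2 * pvP arr j + pvS arr j == T) : Int), pvP arr k) := by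
  induction k with
  | zero => simp [pvP]
  | succ k ih =>
    rw [List.range_succ, List.map_append, List.foldl_append, ih]
    simp only [List.map_cons, List.map_nil, List.foldl_cons, List.foldl_nil, pvStepB,
      List.countP_append, List.countP_cons, List.countP_nil, pvP_succ]
    push_cast
    split <;> simp_all

lemma pvB_eq (arr : List Int) :
    countBalancingElements_alt arr = ((List.range arr.length).countP (pvCondB arr) : Int) := by
  have hT : ((List.range arr.length).map (pvS arr)).sum = pvP arr arr.length := rfl
  unfold countBalancingElements_alt
  simp only [pvB_signed, hT]
  rw [show (fun (st : Int × Int) s =>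
      (if 2 * st.2 + s == pvP arr arr.length then st.1 + 1 else st.1, st.2 + s))
    = pvStepB (pvP arr arr.length) from rfl, pvB_fold]
  rfl

-- pvP decomposes into the two parity prefix sums
lemma pvP_split (arr : List Int) (k : Nat) :
    pvP arr k = pvEP arr k - pvOP arr k := by
  induction k with
  | zero => simp [pvP, pvEP, pvOP]
  | succ k ih =>
    rw [pvP_succ, pvEP_succ, pvOP_succ, ih, pvS]
    rcases Nat.mod_two_eq_zero_or_one k with h | h
    · rw [if_pos h, if_pos h, if_neg (by omega)]; ring
    · rw [if_neg (by omega), if_neg (by omega), if_pos h]; ring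

-- per index, A's test and B's test agree (a linear rearrangement)
lemma pv_cond_eq (arr : List Int) (k : Nat) :
    pvCond arr (pvEP arr arr.length) (pvOP arr arr.length) k = pvCondB arr k := by
  unfold pvCond pvCondB pvS
  rw [pvP_split, pvP_split]
  rcases Nat.mod_two_eq_zero_or_one k with h | h
  · rw [if_pos h, if_pos h, Bool.eq_iff_iff, beq_iff_eq, beq_iff_eq]
    omega
  · rw [if_neg (by omega), if_neg (by omega), Bool.eq_iff_iff, beq_iff_eq, beq_iff_eq]
    omega

-- ===== VERDICT (by name: the statement is the Claim_ definition above) =====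
theorem countBalancingElements_spec : Claim_equal_countBalancingElements := by
  intro arr _
  unfold Spec_countBalancingElements
  rw [pvA_eq, pvB_eq]
  exact_mod_cast List.countP_congr (fun k _ => by rw [pv_cond_eq])
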